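-- pv_equiv track=rewrite | github.com/WSIB-Innovation/payment-schedules | analyze_remaining_errors.py | find_consecutive_failures
-- ===== SOURCE A (Python) =====
-- def find_consecutive_failures(failures_list):
--     """Find consecutive day failure patterns"""
--     failures_list.sort(key=lambda x: x['day'])
--
--     consecutive_groups = []
--     current_group = []
--
--     for failure in failures_list:
--         if not current_group or failure['day'] == current_group[-1]['day'] + 1:
--             current_group.append(failure)
--         else:
--             if len(current_group) >= 2:
--                 consecutive_groups.append(current_group)
--             current_group = [failure]
--
--     if len(current_group) >= 2:
--         consecutive_groups.append(current_group)
--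
--     return consecutive_groups
-- ===== SOURCE B (Python) =====
-- def find_consecutive_failures(failures_list):
--     """Find consecutive day failure patterns"""
--     failures_list.sort(key=lambda x: x['day'])
--
--     runs = []
--     rest = failures_list[:]
--     while rest:
--         run, rest = [rest[0]], rest[1:]
--         while rest and rest[0]['day'] == run[-1]['day'] + 1:
--             run.append(rest[0])
--             rest = rest[1:]
--         runs.append(run)
--
--     return [run for run in runs if len(run) >= 2]
-- ===== Notes on version B (the rewrite author's own statement) =====
-- stated objective: alternative
-- what changed: Replaces A's single-pass running-accumulator with a span-based decomposition: after the same in-place sort, B repeatedly peels one maximal consecutive-day run off the front of the remaining list, collects all runs, and filters runs of length >= 2 in a separate pass.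
import Mathlib
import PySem

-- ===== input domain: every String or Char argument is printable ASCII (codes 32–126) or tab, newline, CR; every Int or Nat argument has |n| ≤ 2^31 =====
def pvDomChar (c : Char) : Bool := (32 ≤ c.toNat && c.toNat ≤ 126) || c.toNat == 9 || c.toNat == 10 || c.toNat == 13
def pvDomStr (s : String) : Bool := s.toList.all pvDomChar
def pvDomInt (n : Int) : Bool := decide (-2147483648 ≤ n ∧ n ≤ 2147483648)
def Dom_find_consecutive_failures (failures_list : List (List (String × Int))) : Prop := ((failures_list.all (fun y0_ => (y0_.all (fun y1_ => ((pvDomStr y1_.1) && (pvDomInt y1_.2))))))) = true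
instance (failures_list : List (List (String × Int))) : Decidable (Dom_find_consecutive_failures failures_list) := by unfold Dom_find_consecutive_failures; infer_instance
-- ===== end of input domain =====

-- B replaces A's running-accumulator pass with span-off-the-front run extraction plus a separate
-- length filter (objective: alternative decomposition, not faster). Both A and B sort the argument
-- in place in Python; the equivalence proved here is about the return value.

-- ===== PORT A =====
-- x['day'] : first-match lookup in the association list (total form; Pre_ guarantees the key exists)
def pvDay (f : List (String × Int)) : Int := (List.lookup "day" f).getD 0

-- the body of A's for-loop, state = (consecutive_groups, current_group)
def pvStepA (st : List (List (List (String × Int))) × List (List (String × Int)))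
    (failure : List (String × Int)) :
    List (List (List (String × Int))) × List (List (String × Int)) :=
  if st.2 = [] ∨ pvDay failure = pvDay (PySem.List.pyGetD st.2 (-1) []) + 1 then
    (st.1, st.2 ++ [failure])
  else
    ((if 2 ≤ st.2.length then st.1 ++ [st.2] else st.1), [failure])

def find_consecutive_failures (failures_list : List (List (String × Int))) : List (List (List (String × Int))) :=
  let s := PySem.List.sorted failures_list pvDay false
  let st := s.foldl pvStepA ([], [])
  if 2 ≤ st.2.length then st.1 ++ [st.2] else st.1

-- ===== PORT B =====
-- inner while: grow `run` while the next element continues the consecutive-day run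
def pvGrow (run rest : List (List (String × Int))) :
    List (List (String × Int)) × List (List (String × Int)) :=
  match rest with
  | [] => (run, [])
  | r :: rs =>
    if pvDay r = pvDay (PySem.List.pyGetD run (-1) []) + 1 then pvGrow (run ++ [r]) rs
    else (run, r :: rs)

theorem pvGrow_snd_length (run rest : List (List (String × Int))) :
    (pvGrow run rest).2.length ≤ rest.length := by
  induction rest generalizing run with
  | nil => simp [pvGrow]
  | cons r rs ih =>
    simp only [pvGrow]
    split
    · exact Nat.le_trans (ih _) (Nat.le_succ _)
    · exact Nat.le_refl _

-- outer while: peel one run off the front of `rest` per iteration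
def pvRunsLoop : List (List (String × Int)) → List (List (List (String × Int)))
  | [] => []
  | x :: rest =>
    (pvGrow [x] rest).1 :: pvRunsLoop (pvGrow [x] rest).2
termination_by l => l.length
decreasing_by
  exact Nat.lt_succ_of_le (pvGrow_snd_length [x] rest)

def find_consecutive_failures_alt (failures_list : List (List (String × Int))) : List (List (List (String × Int))) :=
  let s := PySem.List.sorted failures_list pvDay false
  (pvRunsLoop s).filter (fun run => decide (2 ≤ run.length))

-- ===== PRECONDITION & SPEC =====
-- Pre_ excludes exactly the inputs containing a dict without a 'day' key, on which Python A raises KeyError.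
def Pre_find_consecutive_failures (failures_list : List (List (String × Int))) : Prop :=
  (failures_list.all (fun f => (List.lookup "day" f).isSome)) = true
instance (failures_list : List (List (String × Int))) : Decidable (Pre_find_consecutive_failures failures_list) := by unfold Pre_find_consecutive_failures; infer_instance
def pvWitness_find_consecutive_failures : (List (List (String × Int))) :=
  [[("day", 2)], [("day", 3)], [("day", 7)]]

def Spec_find_consecutive_failures (failures_list : List (List (String × Int))) (out : List (List (List (String × Int)))) : Prop := out = find_consecutive_failures_alt failures_list
instance (failures_list : List (List (String × Int))) (out : List (List (List (String × Int)))) : Decidable (Spec_find_consecutive_failures failures_list out) := by unfold Spec_find_consecutive_failures; infer_instance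

-- ===== CLAIM (what is proved, stated in full; the proofs are below) =====
def Claim_equal_find_consecutive_failures : Prop := ∀ (failures_list : List (List (String × Int))), Dom_find_consecutive_failures failures_list → Pre_find_consecutive_failures failures_list → Spec_find_consecutive_failures failures_list (find_consecutive_failures failures_list)

-- ===== LEMMAS AND PROOFS =====

-- A's loop, started in state (groups, cur) with cur ≠ [], finishes to groups ++ the filtered runs,
-- where the first run is cur grown by pvGrow.
theorem pvLoop_eq (l : List (List (String × Int))) :
    ∀ (groups : List (List (List (String × Int)))) (cur : List (List (String × Int))), cur ≠ [] →
    (let st := l.foldl pvStepA (groups, cur);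
     if 2 ≤ st.2.length then st.1 ++ [st.2] else st.1)
    = groups ++ ((pvGrow cur l).1 :: pvRunsLoop (pvGrow cur l).2).filter
        (fun run => decide (2 ≤ run.length)) := by
  induction l with
  | nil =>
    intro groups cur hcur
    simp only [List.foldl_nil, pvGrow, pvRunsLoop]
    by_cases h2 : 2 ≤ cur.length <;> simp [h2]
  | cons x xs ih =>
    intro groups cur hcur
    simp only [List.foldl_cons]
    by_cases hc : pvDay x = pvDay (PySem.List.pyGetD cur (-1) []) + 1
    · have hstep : pvStepA (groups, cur) x = (groups, cur ++ [x]) := by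
        simp [pvStepA, hc]
      rw [hstep]
      have := ih groups (cur ++ [x]) (by simp)
      simp only at this
      rw [this]
      have hg : pvGrow cur (x :: xs) = pvGrow (cur ++ [x]) xs := by
        simp [pvGrow, hc]
      rw [hg]
    · have hstep : pvStepA (groups, cur) x =
          ((if 2 ≤ cur.length then groups ++ [cur] else groups), [x]) := by
        simp [pvStepA, hc, hcur]
      rw [hstep]
      have := ih (if 2 ≤ cur.length then groups ++ [cur] else groups) [x] (by simp)
      simp only at this
      rw [this]
      have hg : pvGrow cur (x :: xs) = (cur, x :: xs) := by
        simp [pvGrow, hc]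
      rw [hg]
      have hrl : pvRunsLoop (x :: xs)
          = (pvGrow [x] xs).1 :: pvRunsLoop (pvGrow [x] xs).2 := by
        rw [pvRunsLoop]
      rw [hrl]
      simp only [List.filter_cons]
      by_cases h2 : 2 ≤ cur.length
      · simp [h2, List.append_assoc]
      · simp [h2]

-- ===== VERDICT (by name: the statement is the Claim_ definition above) =====
theorem find_consecutive_failures_spec : Claim_equal_find_consecutive_failures := by
  intro l _ _
  unfold Spec_find_consecutive_failures find_consecutive_failures find_consecutive_failures_alt
  cases hs : PySem.List.sorted l pvDay false with
  | nil => simp [pvRunsLoop]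
  | cons x xs =>
    simp only [List.foldl_cons]
    have hstep : pvStepA ([], []) x = ([], [x]) := by simp [pvStepA]
    rw [hstep]
    have := pvLoop_eq xs [] [x] (by simp)
    simp only at this
    rw [this]
    have hrl : pvRunsLoop (x :: xs)
        = (pvGrow [x] xs).1 :: pvRunsLoop (pvGrow [x] xs).2 := by
      rw [pvRunsLoop]
    rw [hrl]
    simp
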